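-- pv_equiv track=rewrite | github.com/ElizabethFireman/CS150 | week_6_python/sentimental-credit/credit.py | p1_check_sum
-- ===== SOURCE A (Python) =====
-- def p1_check_sum(cc_number, cc_length):
--     cc_number = int(cc_number)
--     cc_length = cc_length
--     p1_sum = 0
--     count = 0
--
--     while cc_number > 0:
--         digit = cc_number % 10
--         cc_number = cc_number//10
--         count += 1
--
--         if (count % 2 != 0) and (cc_length % 2 != 0):  # cc number is odd
--             p1_sum = p1_sum + digit
--         elif (count % 2 != 0) and (cc_length % 2 == 0):  # cc number is even
--             p1_sum = p1_sum + digit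
--     return p1_sum
-- ===== SOURCE B (Python) =====
-- def p1_check_sum(cc_number, cc_length):
--     n = int(cc_number)
--     if n <= 0:
--         return 0
--     return sum(int(c) for c in str(n)[::-1][::2])
-- ===== Notes on version B (the rewrite author's own statement) =====
-- stated objective: simpler
-- what changed: Replaces the divmod while-loop with its count/parity accumulator (and the redundant cc_length parity branching whose two arms are identical) by a direct string formulation: reverse str(n) and sum the digits at stride-2 positions.
import Mathlib
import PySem

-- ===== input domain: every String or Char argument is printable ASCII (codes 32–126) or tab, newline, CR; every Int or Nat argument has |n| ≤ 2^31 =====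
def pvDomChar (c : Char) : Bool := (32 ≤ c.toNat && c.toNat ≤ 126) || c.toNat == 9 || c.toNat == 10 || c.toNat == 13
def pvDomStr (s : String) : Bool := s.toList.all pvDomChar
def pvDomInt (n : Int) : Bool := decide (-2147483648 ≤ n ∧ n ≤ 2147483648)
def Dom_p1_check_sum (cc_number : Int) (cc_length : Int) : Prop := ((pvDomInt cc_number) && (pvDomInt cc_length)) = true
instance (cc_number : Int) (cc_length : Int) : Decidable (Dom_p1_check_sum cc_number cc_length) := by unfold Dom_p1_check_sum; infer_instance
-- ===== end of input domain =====

-- B replaces A's divmod loop with count/parity flags (and the redundant identical-armed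
-- cc_length branching) by summing the stride-2 digits of the reversed decimal string; same values, same cost.


-- ===== PORT A =====
-- the while-loop of A: state (cc_number, p1_sum, count); cc_length only read in the branch tests
def p1Loop (cc_length cc_number p1_sum count : Int) : Int :=
  if _h : 0 < cc_number then
    let digit := PySem.Int.mod cc_number 10
    let cc_number' := PySem.Int.floordiv cc_number 10
    let count' := count + 1
    let p1_sum' :=
      if PySem.Int.mod count' 2 ≠ 0 ∧ PySem.Int.mod cc_length 2 ≠ 0 then p1_sum + digit
      else if PySem.Int.mod count' 2 ≠ 0 ∧ PySem.Int.mod cc_length 2 = 0 then p1_sum + digit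
      else p1_sum
    p1Loop cc_length cc_number' p1_sum' count'
  else p1_sum
termination_by cc_number.toNat
decreasing_by
  have h10 : (0:Int) < 10 := by norm_num
  rw [PySem.Int.floordiv_eq_ediv_of_pos h10]
  omega

def p1_check_sum (cc_number : Int) (cc_length : Int) : Int :=
  p1Loop cc_length cc_number 0 0

-- ===== PORT B =====
-- B: if n ≤ 0 return 0 else sum(int(c) for c in str(n)[::-1][::2]).
-- Both slice steps are nonzero, so slice? is always `some` (.getD [] is never the fallback);
-- int(c) is ported as c.toNat - 48, exact on the decimal digit characters str(n) yields for n > 0.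
def p1_check_sum_alt (cc_number : Int) (cc_length : Int) : Int :=
  let n := cc_number
  if n ≤ 0 then 0
  else
    let s := PySem.Int.toChars n
    let r := (PySem.List.slice? s none none (-1)).getD []
    let t := (PySem.List.slice? r none none 2).getD []
    (t.map (fun c => ((c.toNat : Int) - 48))).sum

-- ===== PRECONDITION & SPEC =====
def Spec_p1_check_sum (cc_number : Int) (cc_length : Int) (out : Int) : Prop := out = p1_check_sum_alt cc_number cc_length
instance (cc_number : Int) (cc_length : Int) (out : Int) : Decidable (Spec_p1_check_sum cc_number cc_length out) := by unfold Spec_p1_check_sum; infer_instance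

-- ===== CLAIM (what is proved, stated in full; the proofs are below) =====
def Claim_equal_p1_check_sum : Prop := ∀ (cc_number : Int) (cc_length : Int), Dom_p1_check_sum cc_number cc_length → Spec_p1_check_sum cc_number cc_length (p1_check_sum cc_number cc_length)

-- ===== LEMMAS AND PROOFS =====

-- sum of every other element (positions 0, 2, 4, …), as an Int
def altSum : List Nat → Int
  | [] => 0
  | [d] => (d : Int)
  | d :: _ :: t => (d : Int) + altSum t

-- every other element of a list (positions 0, 2, 4, …)
def everyOther {α : Type} : List α → List α
  | [] => []
  | [a] => [a]
  | a :: _ :: t => a :: everyOther t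

lemma altSum_cons (d : Nat) (t : List Nat) : altSum (d :: t) = (d : Int) + altSum (t.drop 1) := by
  cases t <;> simp [altSum]

lemma p1Loop_eq (L : Int) : ∀ m : Nat, ∀ s c : Int,
    p1Loop L (m : Int) s c =
      s + (if (c + 1) % 2 ≠ 0 then altSum (Nat.digits 10 m)
           else altSum ((Nat.digits 10 m).drop 1)) := by
  intro m
  induction m using Nat.strong_induction_on with
  | _ m ih =>
    intro s c
    rw [p1Loop]
    by_cases hm : 0 < m
    · have hpos : (0 : Int) < (m : Int) := by exact_mod_cast hm
      have hdiv : m / 10 < m := Nat.div_lt_self hm (by norm_num)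
      have hdig : Nat.digits 10 m = m % 10 :: Nat.digits 10 (m / 10) :=
        Nat.digits_def' (by norm_num) hm
      have hfd : PySem.Int.floordiv (m : Int) 10 = ((m / 10 : Nat) : Int) :=
        PySem.Int.floordiv_natCast m 10
      have hmd : PySem.Int.mod (m : Int) 10 = ((m % 10 : Nat) : Int) :=
        PySem.Int.mod_natCast m 10
      have h2 : (0 : Int) < 2 := by norm_num
      simp only [hpos, dif_pos, hfd, hmd, hdig, altSum_cons,
        PySem.Int.mod_eq_emod_of_pos h2]
      rw [ih (m / 10) hdiv]
      by_cases hc : (c + 1) % 2 = 0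
      · have hc2 : ¬ (c + 1 + 1) % 2 = 0 := by omega
        simp [hc, hc2]
      · have hc2 : (c + 1 + 1) % 2 = 0 := by omega
        by_cases hL : L % 2 = 0
        · simp [hc, hc2, hL]
          ring
        · simp [hc, hc2, hL]
          ring
    · have hm0 : m = 0 := by omega
      simp [hm0, altSum]

-- Nat.toDigits via Nat.digits, for positive n
lemma toDigitsCore_eq : ∀ (f n : Nat) (l : List Char), 0 < n → n < f →
    Nat.toDigitsCore 10 f n l = ((Nat.digits 10 n).map Nat.digitChar).reverse ++ l := by
  intro f
  induction f with
  | zero => intro n l hn hf; omega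
  | succ f ih =>
    intro n l hn hf
    rw [Nat.toDigitsCore, Nat.digits_def' (by norm_num : 1 < 10) hn]
    by_cases hd : n / 10 = 0
    · simp [hd]
    · have hn' : 0 < n / 10 := Nat.pos_of_ne_zero hd
      have hf' : n / 10 < f := by
        have := Nat.div_lt_self hn (by norm_num : 1 < 10)
        omega
      simp [hd, ih (n / 10) (Nat.digitChar (n % 10) :: l) hn' hf']

lemma toChars_pos (n : Int) (h : 0 < n) :
    PySem.Int.toChars n = ((Nat.digits 10 n.toNat).map Nat.digitChar).reverse := by
  have h1 : ¬ n < 0 := by omega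
  have h2 : 0 < n.toNat := by omega
  simp only [PySem.Int.toChars, h1, if_false, Nat.toDigits]
  rw [toDigitsCore_eq (n.toNat + 1) n.toNat [] h2 (by omega)]
  simp

lemma fm_shift {α : Type} (a b : α) (t : List α) (c : Nat) :
    List.filterMap (fun (k : Nat) => (a :: b :: t)[((2:Int) * (k:Int)).toNat]?) (List.range (c+1))
      = a :: List.filterMap (fun (k : Nat) => t[((2:Int) * (k:Int)).toNat]?) (List.range c) := by
  simp only [List.range_succ_eq_map, List.filterMap_cons, List.filterMap_map]
  norm_num
  refine List.filterMap_congr (fun k _ => ?_)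
  have h1 : ((2:Int) * ((k:Int) + 1)).toNat = ((2:Int) * (k:Int)).toNat + 1 + 1 := by omega
  rw [h1, List.getElem?_cons_succ, List.getElem?_cons_succ]

-- the stride-2 index list of slice? equals everyOther
lemma fm_eq {α : Type} : ∀ (xs : List α) (c : Nat), c = (xs.length + 1) / 2 →
    List.filterMap (fun (k : Nat) => xs[((2:Int) * (k:Int)).toNat]?) (List.range c) = everyOther xs := by
  intro xs
  induction xs using everyOther.induct with
  | case1 => intro c hc; simp at hc; subst hc; rfl
  | case2 a => intro c hc; simp at hc; subst hc; rfl
  | case3 a b t ih =>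
    intro c hc
    have hc' : c = (t.length + 1) / 2 + 1 := by simp at hc; omega
    rw [hc', fm_shift, ih _ rfl]
    rfl

lemma slice?_two {α : Type} (xs : List α) :
    PySem.List.slice? xs none none 2 = some (everyOther xs) := by
  simp only [PySem.List.slice?, PySem.List.sliceIndices]
  norm_num
  rw [fm_eq xs _ (by split_ifs <;> omega)]

lemma everyOther_map {α β : Type} (f : α → β) : ∀ l : List α,
    everyOther (l.map f) = (everyOther l).map f := by
  intro l
  induction l using everyOther.induct with
  | case1 => rfl
  | case2 a => rfl
  | case3 a b t ih => simp [everyOther, ih]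

lemma sum_val : ∀ l : List Nat, (∀ d ∈ l, d < 10) →
    ((everyOther l).map (fun d => ((Nat.digitChar d).toNat : Int) - 48)).sum = altSum l := by
  have hval : ∀ d : Nat, d < 10 → ((Nat.digitChar d).toNat : Int) - 48 = (d : Int) := by
    intro d hd; interval_cases d <;> rfl
  intro l
  induction l using everyOther.induct with
  | case1 => intro _; rfl
  | case2 a => intro h; simp [everyOther, altSum, hval a (h a (by simp))]
  | case3 a b t ih =>
    intro h
    simp only [everyOther, altSum, List.map_cons, List.sum_cons,
      hval a (h a (by simp)), ih (fun d hd => h d (by simp [hd]))]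

lemma alt_eq (n L : Int) (h : 0 < n) :
    p1_check_sum_alt n L = altSum (Nat.digits 10 n.toNat) := by
  have h' : ¬ n ≤ 0 := by omega
  simp only [p1_check_sum_alt, h', if_false]
  rw [toChars_pos n h, PySem.List.slice?_none_none_neg_one]
  simp only [Option.getD_some, List.reverse_reverse]
  rw [slice?_two]
  simp only [Option.getD_some, everyOther_map, List.map_map]
  exact sum_val _ (fun d hd => Nat.digits_lt_base (by norm_num) hd)

-- ===== VERDICT (by name: the statement is the Claim_ definition above) =====
theorem p1_check_sum_spec : Claim_equal_p1_check_sum := by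
  intro n L _
  show p1_check_sum n L = p1_check_sum_alt n L
  by_cases h : 0 < n
  · have hn : ((n.toNat : Nat) : Int) = n := by omega
    have heq := p1Loop_eq L n.toNat 0 0
    rw [hn] at heq
    rw [p1_check_sum, heq, alt_eq n L h]
    norm_num
  · rw [p1_check_sum, p1Loop]
    have h' : n ≤ 0 := by omega
    simp [h, p1_check_sum_alt, h']
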